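-- pv_equiv track=rewrite | github.com/roma-goodok/guca-evolution-lab | tools/planarity_minimal_faces.py | _unique_cycles
-- ===== SOURCE A (Python) =====
-- def _canonical_rotation(seq):
--     """Return the lexicographically smallest rotation of seq (as a tuple)."""
--     n = len(seq)
--     best = min(range(n), key=lambda i: tuple(seq[i:] + seq[:i]))
--     return tuple(seq[best:] + seq[:best])
--
-- def _canonical_cycle(cyc):
--     """Canonicalize a cycle up to rotation and reversal."""
--     if len(cyc) > 1 and cyc[0] == cyc[-1]:
--         cyc = cyc[:-1]
--     if not cyc:
--         return tuple()
--     fwd = _canonical_rotation(list(cyc))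
--     rev = _canonical_rotation(list(reversed(cyc)))
--     return fwd if fwd <= rev else rev
--
-- def _unique_cycles(cycles):
--     seen = set()
--     out = []
--     for c in cycles:
--         cc = _canonical_cycle(c)
--         if cc and cc not in seen:
--             seen.add(cc)
--             out.append(list(cc))
--     return out
-- ===== SOURCE B (Python) =====
-- def _unique_cycles(cycles):
--     # Canonicalize each cycle via a single streaming minimum over only the
--     # rotations that start at a minimal element (in both directions), and
--     # deduplicate with an insertion-ordered dict keyed by the canonical form.
--     out = {}
--     for c in cycles:
--         if len(c) > 1 and c[0] == c[-1]:
--             c = c[:-1]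
--         if not c:
--             continue
--         n = len(c)
--         m = min(c)
--         best = None
--         for s in (list(c), list(c)[::-1]):
--             for i in range(n):
--                 if s[i] == m:
--                     cand = tuple(s[i:] + s[:i])
--                     if best is None or cand < best:
--                         best = cand
--         if best not in out:
--             out[best] = list(best)
--     return list(out.values())
-- ===== Notes on version B (the rewrite author's own statement) =====
-- stated objective: alternative
-- what changed: B canonicalizes a cycle by one streaming minimum over only the rotations that start at a minimal element (scanning forward and reversed candidates in a single pass with an accumulator), instead of A's argmin-with-key over all n rotations done twice plus a final comparison, and it deduplicates with one insertion-ordered dict instead of a set-plus-list pair.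
import Mathlib
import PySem

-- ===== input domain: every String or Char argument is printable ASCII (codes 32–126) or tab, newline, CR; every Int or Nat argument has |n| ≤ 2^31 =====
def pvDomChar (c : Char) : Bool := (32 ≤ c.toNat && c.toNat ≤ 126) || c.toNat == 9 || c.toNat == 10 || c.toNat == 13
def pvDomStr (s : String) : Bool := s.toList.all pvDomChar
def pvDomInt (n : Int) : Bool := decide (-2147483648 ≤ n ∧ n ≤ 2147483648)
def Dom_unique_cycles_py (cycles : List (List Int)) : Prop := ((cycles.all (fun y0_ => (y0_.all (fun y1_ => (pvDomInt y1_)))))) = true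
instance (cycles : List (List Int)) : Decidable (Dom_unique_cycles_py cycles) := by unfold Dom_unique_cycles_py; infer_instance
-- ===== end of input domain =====

-- B canonicalizes each cycle by one streaming minimum over only the rotations starting at a
-- minimal element (both directions) and deduplicates with an insertion-ordered dict, instead of
-- A's argmin over all rotations done twice plus a set-and-list pair (objective: alternative).

-- ===== PORT A =====
-- Python's '<' on int tuples (lexicographic, a strict prefix is smaller): exact.
def pyLexLt : List Int → List Int → Bool
  | _, [] => false
  | [], _ :: _ => true
  | a :: as, b :: bs => decide (a < b) || (a == b && pyLexLt as bs)

-- Python's '<=' on int tuples: exact.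
def pyLexLe : List Int → List Int → Bool
  | [], _ => true
  | _ :: _, [] => false
  | a :: as, b :: bs => decide (a < b) || (a == b && pyLexLe as bs)

-- seq[i:] + seq[:i] for 0 ≤ i ≤ len(seq): a slice at a nonnegative in-range index is drop/take (exact).
def pyRot (seq : List Int) (i : Nat) : List Int := seq.drop i ++ seq.take i

-- min(range(n), key=lambda i: tuple(seq[i:] + seq[:i])): first index of minimal key,
-- as the running (best index, best key) fold Python's min performs.
def canonicalRotation (seq : List Int) : List Int :=
  match List.range seq.length with
  | [] => []      -- Python's min raises on an empty range; unreachable (callers pass a nonempty seq)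
  | i :: rest =>
      pyRot seq ((rest.foldl (fun b j =>
        if pyLexLt (pyRot seq j) b.2 then (j, pyRot seq j) else b) (i, pyRot seq i)).1)

-- 'if len(cyc) > 1 and cyc[0] == cyc[-1]: cyc = cyc[:-1]'  (cyc[:-1] = dropLast: exact).
def pyStripClose (cyc : List Int) : List Int :=
  if 1 < cyc.length && cyc.head? == cyc.getLast? then cyc.dropLast else cyc

def canonicalCycle (cyc : List Int) : List Int :=
  let cyc := pyStripClose cyc
  if cyc = [] then []
  else
    let fwd := canonicalRotation cyc
    let rev := canonicalRotation cyc.reverse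
    if pyLexLe fwd rev then fwd else rev

def unique_cycles_py (cycles : List (List Int)) : List (List Int) :=
  (cycles.foldl (fun st c =>
      let cc := canonicalCycle c
      if !(cc == []) && !(PySem.Set.contains st.1 cc) then (PySem.Set.add st.1 cc, st.2 ++ [cc])
      else st)
    ((PySem.Set.empty : PySem.Set (List Int)), ([] : List (List Int)))).2

-- ===== PORT B =====
-- the inner 'for i in range(n): if s[i] == m: cand = tuple(s[i:] + s[:i]); …' streaming-minimum
-- pass of Source B (s[i] at 0 ≤ i < len s is getD; the slices are drop/take: exact)
def scanMinRots (s : List Int) (m : Int) (best0 : Option (List Int)) : Option (List Int) :=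
  (List.range s.length).foldl (fun best i =>
    if s.getD i 0 == m then
      let cand := s.drop i ++ s.take i
      match best with
      | none => some cand
      | some b => if pyLexLt cand b then some cand else best
    else best) best0

def unique_cycles_py_alt (cycles : List (List Int)) : List (List Int) :=
  (cycles.foldl (fun d c =>
      let c := pyStripClose c
      if c = [] then d
      else
        let m := (PySem.List.min? c (fun y => y)).getD 0   -- min(c); c ≠ [] so min? is some
        match scanMinRots c.reverse m (scanMinRots c m none) with
        | none => d         -- unreachable: m occurs in c
        | some cc => if d.contains cc then d else d.insert cc cc)
    (PySem.Dict.empty : PySem.Dict (List Int) (List Int))).values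

-- ===== PRECONDITION & SPEC =====
def Spec_unique_cycles_py (cycles : List (List Int)) (out : List (List Int)) : Prop := out = unique_cycles_py_alt cycles
instance (cycles : List (List Int)) (out : List (List Int)) : Decidable (Spec_unique_cycles_py cycles out) := by unfold Spec_unique_cycles_py; infer_instance

-- ===== CLAIM (what is proved, stated in full; the proofs are below) =====
def Claim_equal_unique_cycles_py : Prop := ∀ (cycles : List (List Int)), Dom_unique_cycles_py cycles → Spec_unique_cycles_py cycles (unique_cycles_py cycles)

-- ===== LEMMAS AND PROOFS =====

theorem pyLexLe_refl (a : List Int) : pyLexLe a a = true := by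
  induction a with
  | nil => rfl
  | cons x xs ih => simp [pyLexLe, ih]

theorem pyLexLt_eq_not_le (a b : List Int) : pyLexLt a b = !pyLexLe b a := by
  induction a generalizing b with
  | nil => cases b <;> simp [pyLexLt, pyLexLe]
  | cons x xs ih =>
      cases b with
      | nil => simp [pyLexLt, pyLexLe]
      | cons y ys =>
          simp only [pyLexLt, pyLexLe, ih]
          rcases lt_trichotomy x y with h | h | h
          · simp [h, not_lt.2 (le_of_lt h), ne_of_gt h]
          · simp [h]
          · simp [not_lt.2 (le_of_lt h), h, ne_of_gt h]

theorem pyLexLe_of_lt {a b : List Int} (h : pyLexLt a b = true) : pyLexLe a b = true := by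
  induction a generalizing b with
  | nil => cases b <;> simp [pyLexLe]
  | cons x xs ih =>
      cases b with
      | nil => simp [pyLexLt] at h
      | cons y ys =>
          simp only [pyLexLt, Bool.or_eq_true, Bool.and_eq_true] at h
          simp only [pyLexLe, Bool.or_eq_true, Bool.and_eq_true]
          rcases h with h | ⟨h1, h2⟩
          · exact Or.inl h
          · exact Or.inr ⟨h1, ih h2⟩

theorem pyLexLe_total {a b : List Int} (h : pyLexLe a b = false) : pyLexLe b a = true := by
  have := pyLexLt_eq_not_le b a
  rw [h] at this
  exact pyLexLe_of_lt (by simp [this])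

theorem pyLexLe_of_not_lt {a b : List Int} (h : pyLexLt a b = false) : pyLexLe b a = true := by
  have := pyLexLt_eq_not_le a b
  rw [h] at this
  simpa using this.symm

theorem pyLexLe_trans {a b c : List Int} (h1 : pyLexLe a b = true) (h2 : pyLexLe b c = true) :
    pyLexLe a c = true := by
  induction a generalizing b c with
  | nil => simp [pyLexLe]
  | cons x xs ih =>
      cases b with
      | nil => simp [pyLexLe] at h1
      | cons y ys =>
          cases c with
          | nil => simp [pyLexLe] at h2
          | cons z zs =>
              simp only [pyLexLe, Bool.or_eq_true, Bool.and_eq_true, decide_eq_true_eq,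
                beq_iff_eq] at h1 h2 ⊢
              rcases h1 with h1 | ⟨he1, h1⟩
              · rcases h2 with h2 | ⟨he2, h2⟩
                · exact Or.inl (lt_trans h1 h2)
                · exact Or.inl (he2 ▸ h1)
              · rcases h2 with h2 | ⟨he2, h2⟩
                · exact Or.inl (he1 ▸ h2)
                · exact Or.inr ⟨he1.trans he2, ih h1 h2⟩

theorem pyLexLe_antisymm {a b : List Int} (h1 : pyLexLe a b = true) (h2 : pyLexLe b a = true) :
    a = b := by
  induction a generalizing b with
  | nil => cases b with
    | nil => rfl
    | cons y ys => simp [pyLexLe] at h2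
  | cons x xs ih =>
      cases b with
      | nil => simp [pyLexLe] at h1
      | cons y ys =>
          simp only [pyLexLe, Bool.or_eq_true, Bool.and_eq_true, decide_eq_true_eq,
            beq_iff_eq] at h1 h2
          rcases h1 with h1 | ⟨he1, h1⟩
          · rcases h2 with h2 | ⟨he2, h2⟩
            · exact absurd h2 (not_lt.2 (le_of_lt h1))
            · exact absurd he2 (ne_of_gt h1)
          · rcases h2 with h2 | ⟨he2, h2⟩
            · exact absurd h2 (not_lt.2 (le_of_eq he1))
            · exact by rw [he1, ih h1 h2]

theorem pyLexLe_of_head_lt {x y : Int} (xs ys : List Int) (h : x < y) :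
    pyLexLe (x :: xs) (y :: ys) = true := by
  simp [pyLexLe, h]

-- the set of all rotations of s, and the minimality predicate both programs realize
def rots (s : List Int) : List (List Int) := (List.range s.length).map (pyRot s)

def IsMinL (l : List (List Int)) (r : List Int) : Prop :=
  r ∈ l ∧ ∀ x ∈ l, pyLexLe r x = true

theorem isMinL_unique {l : List (List Int)} {r1 r2 : List Int}
    (h1 : IsMinL l r1) (h2 : IsMinL l r2) : r1 = r2 :=
  pyLexLe_antisymm (h1.2 r2 h2.1) (h2.2 r1 h1.1)

-- A's running argmin-with-key fold
theorem foldMin_spec (s : List Int) (js : List Nat) :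
    ∀ (p : Nat × List Int), p.2 = pyRot s p.1 →
    (let q := js.foldl (fun b j => if pyLexLt (pyRot s j) b.2 then (j, pyRot s j) else b) p
     q.2 = pyRot s q.1 ∧ (q = p ∨ q.1 ∈ js) ∧ pyLexLe q.2 p.2 = true ∧
       ∀ j ∈ js, pyLexLe q.2 (pyRot s j) = true) := by
  induction js with
  | nil =>
      intro p hp
      exact ⟨hp, Or.inl rfl, pyLexLe_refl _, by simp⟩
  | cons j js ih =>
      intro p hp
      simp only [List.foldl_cons]
      by_cases h : pyLexLt (pyRot s j) p.2 = true
      · rw [if_pos h]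
        obtain ⟨q1, q2, q3, q4⟩ := ih (j, pyRot s j) rfl
        refine ⟨q1, ?_, ?_, ?_⟩
        · rcases q2 with h' | h'
          · exact Or.inr (by simp [h'])
          · exact Or.inr (List.mem_cons_of_mem _ h')
        · exact pyLexLe_trans q3 (pyLexLe_of_lt h)
        · intro j' hj'
          rcases List.mem_cons.1 hj' with rfl | hj'
          · exact q3
          · exact q4 j' hj'
      · rw [if_neg h]
        obtain ⟨q1, q2, q3, q4⟩ := ih p hp
        refine ⟨q1, ?_, q3, ?_⟩
        · rcases q2 with h' | h'
          · exact Or.inl h'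
          · exact Or.inr (List.mem_cons_of_mem _ h')
        · intro j' hj'
          rcases List.mem_cons.1 hj' with rfl | hj'
          · exact pyLexLe_trans q3 (pyLexLe_of_not_lt (Bool.eq_false_iff.2 h))
          · exact q4 j' hj'

theorem canonicalRotation_isMin (s : List Int) (hs : s ≠ []) :
    IsMinL (rots s) (canonicalRotation s) := by
  cases hr : List.range s.length with
  | nil =>
      exfalso
      have : s.length = 0 := by simpa using congrArg List.length hr
      exact hs (List.length_eq_zero_iff.1 this)
  | cons i rest =>
      obtain ⟨q1, q2, q3, q4⟩ := foldMin_spec s rest (i, pyRot s i) rfl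
      have hres : canonicalRotation s =
          (rest.foldl (fun b j => if pyLexLt (pyRot s j) b.2 then (j, pyRot s j) else b)
            (i, pyRot s i)).2 := by
        rw [canonicalRotation, hr, q1]
      constructor
      · rw [hres, q1, rots, hr]
        apply List.mem_map_of_mem
        rcases q2 with h' | h'
        · rw [h']; exact List.mem_cons_self
        · exact List.mem_cons_of_mem _ h'
      · intro x hx
        rw [rots, hr] at hx
        obtain ⟨j, hj, rfl⟩ := List.mem_map.1 hx
        rw [hres]
        rcases List.mem_cons.1 hj with rfl | hj
        · exact q3
        · exact q4 j hj

-- the candidate list B actually scans: rotations starting at a position holding m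
def fcands (s : List Int) (m : Int) : List (List Int) :=
  ((List.range s.length).filter (fun i => s.getD i 0 == m)).map (fun i => s.drop i ++ s.take i)

def optFold (l : List (List Int)) (b : Option (List Int)) : Option (List Int) :=
  l.foldl (fun best cand => match best with
    | none => some cand
    | some x => if pyLexLt cand x then some cand else best) b

theorem scanMinRots_eq (s : List Int) (m : Int) (b : Option (List Int)) :
    scanMinRots s m b = optFold (fcands s m) b := by
  simp only [optFold, fcands, List.foldl_map, List.foldl_filter]
  rfl

theorem optFold_spec (l : List (List Int)) :
    ∀ (b : Option (List Int)),
      (optFold l b = b ∨ ∃ x ∈ l, optFold l b = some x) ∧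
      (∀ x, b = some x → ∃ y, optFold l b = some y ∧ pyLexLe y x = true) ∧
      (∀ x ∈ l, ∃ y, optFold l b = some y ∧ pyLexLe y x = true) := by
  induction l with
  | nil =>
      intro b
      refine ⟨Or.inl rfl, ?_, by simp⟩
      intro x hb
      exact ⟨x, by simpa [optFold] using hb, pyLexLe_refl _⟩
  | cons c l ih =>
      intro b
      cases b with
      | none =>
          have hstep : optFold (c :: l) none = optFold l (some c) := by
            simp [optFold]
          obtain ⟨ih1, ih2, ih3⟩ := ih (some c)
          rw [hstep]
          refine ⟨?_, ?_, ?_⟩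
          · rcases ih1 with h | ⟨x, hx, hxx⟩
            · exact Or.inr ⟨c, List.mem_cons_self, h⟩
            · exact Or.inr ⟨x, List.mem_cons_of_mem _ hx, hxx⟩
          · intro x hx; simp at hx
          · intro x hx
            rcases List.mem_cons.1 hx with rfl | hx
            · exact ih2 x rfl
            · exact ih3 x hx
      | some x0 =>
          by_cases hlt : pyLexLt c x0 = true
          · have hstep : optFold (c :: l) (some x0) = optFold l (some c) := by
              simp [optFold, hlt]
            obtain ⟨ih1, ih2, ih3⟩ := ih (some c)
            rw [hstep]
            refine ⟨?_, ?_, ?_⟩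
            · rcases ih1 with h | ⟨x, hx, hxx⟩
              · exact Or.inr ⟨c, List.mem_cons_self, h⟩
              · exact Or.inr ⟨x, List.mem_cons_of_mem _ hx, hxx⟩
            · intro x hx
              simp only [Option.some.injEq] at hx
              subst hx
              obtain ⟨y, hy, hyc⟩ := ih2 c rfl
              exact ⟨y, hy, pyLexLe_trans hyc (pyLexLe_of_lt hlt)⟩
            · intro x hx
              rcases List.mem_cons.1 hx with rfl | hx
              · exact ih2 x rfl
              · exact ih3 x hx
          · have hlt' : pyLexLt c x0 = false := Bool.eq_false_iff.2 hlt
            have hstep : optFold (c :: l) (some x0) = optFold l (some x0) := by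
              simp [optFold, hlt']
            obtain ⟨ih1, ih2, ih3⟩ := ih (some x0)
            rw [hstep]
            refine ⟨?_, ?_, ?_⟩
            · rcases ih1 with h | ⟨x, hx, hxx⟩
              · exact Or.inl h
              · exact Or.inr ⟨x, List.mem_cons_of_mem _ hx, hxx⟩
            · intro x hx
              simp only [Option.some.injEq] at hx
              subst hx
              exact ih2 x0 rfl
            · intro x hx
              rcases List.mem_cons.1 hx with rfl | hx
              · obtain ⟨y, hy, hyx⟩ := ih2 x0 rfl
                exact ⟨y, hy, pyLexLe_trans hyx (pyLexLe_of_not_lt hlt')⟩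
              · exact ih3 x hx

theorem mem_rots_of_mem_fcands {s : List Int} {m : Int} {x : List Int}
    (hx : x ∈ fcands s m) : x ∈ rots s := by
  obtain ⟨i, hi, rfl⟩ := List.mem_map.1 hx
  exact List.mem_map.2 ⟨i, List.mem_of_mem_filter hi, rfl⟩

theorem head_of_mem_fcands {s : List Int} {m : Int} {x : List Int}
    (hx : x ∈ fcands s m) : ∃ t, x = m :: t := by
  obtain ⟨i, hi, rfl⟩ := List.mem_map.1 hx
  have h1 : i ∈ List.range s.length := List.mem_of_mem_filter hi
  have h2 : s.getD i 0 = m := by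
    have := (List.mem_filter.1 hi).2
    simpa using this
  have hlt : i < s.length := List.mem_range.1 h1
  have hget : s.getD i 0 = s[i] := List.getD_eq_getElem s 0 hlt
  refine ⟨s.drop (i + 1) ++ s.take i, ?_⟩
  rw [List.drop_eq_getElem_cons hlt, ← hget, h2]
  rfl

theorem mem_fcands_or_head_ne {s : List Int} (m : Int) {x : List Int} (hx : x ∈ rots s) :
    x ∈ fcands s m ∨ ∃ v t, x = v :: t ∧ v ∈ s ∧ v ≠ m := by
  obtain ⟨i, hi, rfl⟩ := List.mem_map.1 hx
  have hlt : i < s.length := List.mem_range.1 hi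
  have hget : s.getD i 0 = s[i] := List.getD_eq_getElem s 0 hlt
  by_cases hc : s.getD i 0 = m
  · left
    exact List.mem_map.2 ⟨i, List.mem_filter.2 ⟨hi, by simpa using hc⟩, rfl⟩
  · right
    refine ⟨s[i], s.drop (i + 1) ++ s.take i, ?_, List.getElem_mem hlt, by rw [← hget]; exact hc⟩
    rw [pyRot, List.drop_eq_getElem_cons hlt]
    rfl

theorem fcands_ne_nil {s : List Int} {m : Int} (hm : m ∈ s) : fcands s m ≠ [] := by
  obtain ⟨i, hlt, hget⟩ := List.mem_iff_getElem.1 hm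
  have : (s.drop i ++ s.take i) ∈ fcands s m := by
    refine List.mem_map.2 ⟨i, List.mem_filter.2 ⟨List.mem_range.2 hlt, ?_⟩, rfl⟩
    have : s.getD i 0 = m := by rw [List.getD_eq_getElem s 0 hlt, hget]
    simpa using this
  intro h
  rw [h] at this
  exact List.not_mem_nil this

theorem canon_eq_core (s : List Int) (hs : s ≠ []) (m : Int)
    (hm : PySem.List.min? s (fun y => y) = some m) :
    scanMinRots s.reverse m (scanMinRots s m none) =
      some (if pyLexLe (canonicalRotation s) (canonicalRotation s.reverse) = true
            then canonicalRotation s else canonicalRotation s.reverse) := by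
  rw [scanMinRots_eq, scanMinRots_eq]
  have hmem : m ∈ s := PySem.List.min?_mem hm
  have hmin : ∀ v ∈ s, m ≤ v := fun v hv => PySem.List.min?_isMin hm v hv
  obtain ⟨i1, i2, i3⟩ := optFold_spec (fcands s m) none
  obtain ⟨o1, o2, o3⟩ := optFold_spec (fcands s.reverse m) (optFold (fcands s m) none)
  -- the scans produce some cc
  obtain ⟨x0, hx0⟩ := List.exists_mem_of_ne_nil _ (fcands_ne_nil hmem)
  obtain ⟨y0, hy0, _⟩ := i3 x0 hx0
  obtain ⟨cc, hcc, _⟩ := o2 y0 hy0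
  -- cc lies in one of the two candidate lists
  have hccmem : cc ∈ fcands s m ∨ cc ∈ fcands s.reverse m := by
    rcases o1 with h | ⟨x, hx, hxe⟩
    · rw [h, hy0, Option.some.injEq] at hcc
      rcases i1 with h' | ⟨x, hx, hxe⟩
      · rw [hy0] at h'; exact absurd h' (by simp)
      · rw [hxe, Option.some.injEq] at hy0
        left; rw [← hcc, ← hy0]; exact hx
    · rw [hxe, Option.some.injEq] at hcc
      right; rw [← hcc]; exact hx
  -- cc starts with m
  obtain ⟨tc, htc⟩ : ∃ t, cc = m :: t := by
    rcases hccmem with h | h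
    · exact head_of_mem_fcands h
    · exact head_of_mem_fcands h
  -- cc is a minimum of all rotations of s and of s.reverse
  have hIsMin : IsMinL (rots s ++ rots s.reverse) cc := by
    constructor
    · rcases hccmem with h | h
      · exact List.mem_append_left _ (mem_rots_of_mem_fcands h)
      · exact List.mem_append_right _ (mem_rots_of_mem_fcands h)
    · intro x hx
      have hbound : ∀ z ∈ fcands s m, pyLexLe cc z = true := by
        intro z hz
        obtain ⟨y, hy, hyz⟩ := i3 z hz
        obtain ⟨w, hw, hwy⟩ := o2 y hy
        rw [hcc, Option.some.injEq] at hw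
        exact hw ▸ pyLexLe_trans hwy hyz
      have hboundr : ∀ z ∈ fcands s.reverse m, pyLexLe cc z = true := by
        intro z hz
        obtain ⟨w, hw, hwz⟩ := o3 z hz
        rw [hcc, Option.some.injEq] at hw
        exact hw ▸ hwz
      rcases List.mem_append.1 hx with hx | hx
      · rcases mem_fcands_or_head_ne m hx with h | ⟨v, t, rfl, hv, hvm⟩
        · exact hbound _ h
        · rw [htc]
          exact pyLexLe_of_head_lt _ _ (lt_of_le_of_ne (hmin v hv) (Ne.symm hvm))
      · rcases mem_fcands_or_head_ne m hx with h | ⟨v, t, rfl, hv, hvm⟩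
        · exact hboundr _ h
        · rw [htc]
          exact pyLexLe_of_head_lt _ _
            (lt_of_le_of_ne (hmin v (List.mem_reverse.1 hv)) (Ne.symm hvm))
  -- A's combined minimum is a minimum of the same list
  have hfwd := canonicalRotation_isMin s hs
  have hrev := canonicalRotation_isMin s.reverse (by simpa using hs)
  have hAIsMin : IsMinL (rots s ++ rots s.reverse)
      (if pyLexLe (canonicalRotation s) (canonicalRotation s.reverse) = true
       then canonicalRotation s else canonicalRotation s.reverse) := by
    by_cases hle : pyLexLe (canonicalRotation s) (canonicalRotation s.reverse) = true
    · rw [if_pos hle]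
      refine ⟨List.mem_append_left _ hfwd.1, ?_⟩
      intro x hx
      rcases List.mem_append.1 hx with hx | hx
      · exact hfwd.2 x hx
      · exact pyLexLe_trans hle (hrev.2 x hx)
    · rw [if_neg hle]
      have hle' : pyLexLe (canonicalRotation s.reverse) (canonicalRotation s) = true :=
        pyLexLe_total (Bool.eq_false_iff.2 hle)
      refine ⟨List.mem_append_right _ hrev.1, ?_⟩
      intro x hx
      rcases List.mem_append.1 hx with hx | hx
      · exact pyLexLe_trans hle' (hfwd.2 x hx)
      · exact hrev.2 x hx
  rw [hcc, isMinL_unique hIsMin hAIsMin]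

-- the common next-output of both loops after one cycle
def pvNext (out : List (List Int)) (c : List Int) : List (List Int) :=
  let cc := canonicalCycle c
  if cc ≠ [] ∧ cc ∉ out then out ++ [cc] else out

theorem dict_eq_mk {d : PySem.Dict (List Int) (List Int)} {l : List (List Int × List Int)}
    (h : d.items = l) : d = PySem.Dict.mk l := by
  cases d
  cases h
  rfl

theorem contains_mk_map (out : List (List Int)) (cc : List Int) :
    (PySem.Dict.mk (out.map fun x => (x, x))).contains cc = decide (cc ∈ out) := by
  rw [PySem.Dict.contains_mk]
  induction out with
  | nil => simp
  | cons o out ih =>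
      simp only [List.map_cons, List.any_cons, ih]
      by_cases h : o = cc
      · simp [h]
      · have h1 : (o == cc) = false := by simpa using h
        have h2 : (cc ∈ o :: out) ↔ (cc ∈ out) := by
          rw [List.mem_cons]
          exact ⟨fun hh => hh.elim (fun hh => absurd hh.symm h) id, Or.inr⟩
        simp [h1, h2]

theorem rots_ne_nil {s : List Int} (_hs : s ≠ []) {x : List Int} (hx : x ∈ rots s) : x ≠ [] := by
  obtain ⟨i, hi, rfl⟩ := List.mem_map.1 hx
  have hlt : i < s.length := List.mem_range.1 hi
  intro h
  obtain ⟨h1, -⟩ := List.append_eq_nil_iff.1 h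
  have := congrArg List.length h1
  simp at this
  omega

theorem canonicalCycle_ne_nil {c : List Int} (h : pyStripClose c ≠ []) :
    canonicalCycle c ≠ [] := by
  rw [canonicalCycle]
  simp only [if_neg h]
  have hfwd := canonicalRotation_isMin (pyStripClose c) h
  have hrev := canonicalRotation_isMin (pyStripClose c).reverse (by simpa using h)
  by_cases hle : pyLexLe (canonicalRotation (pyStripClose c))
      (canonicalRotation (pyStripClose c).reverse) = true
  · rw [if_pos hle]; exact rots_ne_nil h hfwd.1
  · rw [if_neg hle]; exact rots_ne_nil (by simpa using h) hrev.1

theorem min?_eq_some_getD {c : List Int} (h : c ≠ []) :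
    PySem.List.min? c (fun y => y) = some ((PySem.List.min? c (fun y => y)).getD 0) := by
  cases hm : PySem.List.min? c (fun y => y) with
  | none => exact absurd ((PySem.List.min?_eq_none_iff c _).1 hm) h
  | some m => rfl

theorem stepA_eq (out : List (List Int)) (c : List Int) :
    (fun (st : PySem.Set (List Int) × List (List Int)) c =>
      let cc := canonicalCycle c
      if !(cc == []) && !(PySem.Set.contains st.1 cc) then (PySem.Set.add st.1 cc, st.2 ++ [cc])
      else st) (out, out) c = (pvNext out c, pvNext out c) := by
  show (let cc := canonicalCycle c
        if !(cc == []) && !(PySem.Set.contains out cc) then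
          (PySem.Set.add out cc, out ++ [cc])
        else (out, out)) = _
  rw [pvNext]
  by_cases hcc : canonicalCycle c = []
  · simp [hcc]
  · by_cases hmem : canonicalCycle c ∈ out
    · simp [hmem]
    · simp [hcc, hmem, PySem.Set.add_of_not_mem]

theorem stepB_eq (out : List (List Int)) (c : List Int) :
    (fun (d : PySem.Dict (List Int) (List Int)) c =>
      let c := pyStripClose c
      if c = [] then d
      else
        let m := (PySem.List.min? c (fun y => y)).getD 0
        match scanMinRots c.reverse m (scanMinRots c m none) with
        | none => d
        | some cc => if d.contains cc then d else d.insert cc cc)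
      (PySem.Dict.mk (out.map fun x => (x, x))) c
    = PySem.Dict.mk ((pvNext out c).map fun x => (x, x)) := by
  by_cases hstrip : pyStripClose c = []
  · have hcc : canonicalCycle c = [] := by rw [canonicalCycle]; simp [hstrip]
    have h2 : pvNext out c = out := by rw [pvNext]; simp [hcc]
    simp [hstrip, h2]
  · have hscan := canon_eq_core (pyStripClose c) hstrip _ (min?_eq_some_getD hstrip)
    have hcanon : canonicalCycle c =
        (if pyLexLe (canonicalRotation (pyStripClose c))
            (canonicalRotation (pyStripClose c).reverse) = true
         then canonicalRotation (pyStripClose c)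
         else canonicalRotation (pyStripClose c).reverse) := by
      rw [canonicalCycle]
      simp only [if_neg hstrip]
    show (if pyStripClose c = [] then PySem.Dict.mk (out.map fun x => (x, x))
          else
            match scanMinRots (pyStripClose c).reverse
                ((PySem.List.min? (pyStripClose c) fun y => y).getD 0)
                (scanMinRots (pyStripClose c)
                  ((PySem.List.min? (pyStripClose c) fun y => y).getD 0) none) with
            | none => PySem.Dict.mk (out.map fun x => (x, x))
            | some cc =>
                if (PySem.Dict.mk (out.map fun x => (x, x))).contains cc then
                  PySem.Dict.mk (out.map fun x => (x, x))
                else (PySem.Dict.mk (out.map fun x => (x, x))).insert cc cc)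
        = PySem.Dict.mk ((pvNext out c).map fun x => (x, x))
    rw [if_neg hstrip, hscan, ← hcanon]
    by_cases hmem : canonicalCycle c ∈ out
    · have h1 : (PySem.Dict.mk (out.map fun x => (x, x))).contains (canonicalCycle c) = true := by
        rw [contains_mk_map]; simpa using hmem
      have h2 : pvNext out c = out := by rw [pvNext]; simp [hmem]
      simp [h1, h2]
    · have h1 : (PySem.Dict.mk (out.map fun x => (x, x))).contains (canonicalCycle c) = false := by
        rw [contains_mk_map]; simpa using hmem
      have h2 : pvNext out c = out ++ [canonicalCycle c] := by
        rw [pvNext]; simp [hmem, canonicalCycle_ne_nil hstrip]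
      rw [h2]
      simp only [h1, Bool.false_eq_true, if_false]
      refine dict_eq_mk ?_
      rw [PySem.Dict.items_insert_of_not_contains _ _ h1]
      simp

theorem loop_eq (cycles : List (List Int)) :
    ∀ (out : List (List Int)),
      (cycles.foldl (fun st c =>
          let cc := canonicalCycle c
          if !(cc == []) && !(PySem.Set.contains st.1 cc) then (PySem.Set.add st.1 cc, st.2 ++ [cc])
          else st) (out, out)).2 =
      (cycles.foldl (fun d c =>
          let c := pyStripClose c
          if c = [] then d
          else
            let m := (PySem.List.min? c (fun y => y)).getD 0
            match scanMinRots c.reverse m (scanMinRots c m none) with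
            | none => d
            | some cc => if d.contains cc then d else d.insert cc cc)
        (PySem.Dict.mk (out.map fun x => (x, x)))).values := by
  induction cycles with
  | nil =>
      intro out
      simp [PySem.Dict.values_mk, List.map_map, Function.comp_def]
  | cons c cycles ih =>
      intro out
      rw [List.foldl_cons, List.foldl_cons]
      have e1 := congrArg
        (fun z => (List.foldl (fun (st : PySem.Set (List Int) × List (List Int)) c =>
            let cc := canonicalCycle c
            if !(cc == []) && !(PySem.Set.contains st.1 cc) then
              (PySem.Set.add st.1 cc, st.2 ++ [cc])
            else st) z cycles).2) (stepA_eq out c)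
      have e2 := congrArg
        (fun z => (List.foldl (fun (d : PySem.Dict (List Int) (List Int)) c =>
            let c := pyStripClose c
            if c = [] then d
            else
              let m := (PySem.List.min? c (fun y => y)).getD 0
              match scanMinRots c.reverse m (scanMinRots c m none) with
              | none => d
              | some cc => if d.contains cc then d else d.insert cc cc) z cycles).values)
        (stepB_eq out c)
      exact e1.trans ((ih (pvNext out c)).trans e2.symm)

-- ===== VERDICT (by name: the statement is the Claim_ definition above) =====
theorem unique_cycles_py_spec : Claim_equal_unique_cycles_py := by
  intro cycles _
  unfold Spec_unique_cycles_py unique_cycles_py unique_cycles_py_alt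
  have := loop_eq cycles []
  simpa [PySem.Set.empty, PySem.Dict.empty] using this
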